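-- pv_equiv track=rewrite | github.com/stuartcrobinson/parsely_analysis | src/analyze_7_30_10pm_1.py | format_monthly_ranking_line
-- ===== SOURCE A (Python) =====
-- from collections import defaultdict
--
-- def format_monthly_ranking_line(year_month, winners):
--     """Format a single monthly ranking line with proper tie notation."""
--     if not winners:
--         return f"{year_month}  [No data]"
--
--     # Group by value to detect ties
--     value_groups = defaultdict(list)
--     for name, value, articles in winners:
--         value_groups[value].append((name, articles))
--
--     # Build the output
--     parts = []
--     values = []
--     article_counts = []
--
--     for value in sorted(value_groups.keys(), reverse=True):
--         journalists = value_groups[value]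
--
--         if len(journalists) > 1:
--             # Handle tie
--             names = [j[0] for j in journalists]
--             parts.append(f"[{', '.join(names)}] TIE")
--             for _, articles in journalists:
--                 article_counts.append(str(articles))
--         else:
--             # Single journalist
--             name, articles = journalists[0]
--             parts.append(name)
--             article_counts.append(str(articles))
--
--         # Add values for each journalist in this group
--         values.extend([str(int(value))] * len(journalists))
--
--     # Format: "2024-07  Lena, Chase, Justin - 85814, 13545, 12314 - 3, 7, 9"
--     return f"{year_month}  {', '.join(parts)} - {', '.join(values)} - {', '.join(article_counts)}"
-- ===== SOURCE B (Python) =====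
-- def format_monthly_ranking_line(year_month, winners):
--     """Sort once (stable, descending by value), then emit runs of equal values as groups."""
--     if not winners:
--         return f"{year_month}  [No data]"
--
--     ranked = sorted(winners, key=lambda w: w[1], reverse=True)
--
--     parts = []
--     values = []
--     article_counts = []
--     rest = ranked
--     while rest:
--         value = rest[0][1]
--         k = 1
--         while k < len(rest) and rest[k][1] == value:
--             k += 1
--         group, rest = rest[:k], rest[k:]
--         if k > 1:
--             parts.append("[" + ", ".join(w[0] for w in group) + "] TIE")
--         else:
--             parts.append(group[0][0])
--         values.extend([str(int(value))] * k)
--         article_counts.extend(str(w[2]) for w in group)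
--
--     return f"{year_month}  {', '.join(parts)} - {', '.join(values)} - {', '.join(article_counts)}"
-- ===== Notes on version B (the rewrite author's own statement) =====
-- stated objective: alternative
-- what changed: Replaces the defaultdict grouping plus sort of the distinct keys by a single stable descending sort of the winners list followed by one pass that cuts it into runs of equal values; stability makes each run equal A's per-key group in insertion order.
import Mathlib
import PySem

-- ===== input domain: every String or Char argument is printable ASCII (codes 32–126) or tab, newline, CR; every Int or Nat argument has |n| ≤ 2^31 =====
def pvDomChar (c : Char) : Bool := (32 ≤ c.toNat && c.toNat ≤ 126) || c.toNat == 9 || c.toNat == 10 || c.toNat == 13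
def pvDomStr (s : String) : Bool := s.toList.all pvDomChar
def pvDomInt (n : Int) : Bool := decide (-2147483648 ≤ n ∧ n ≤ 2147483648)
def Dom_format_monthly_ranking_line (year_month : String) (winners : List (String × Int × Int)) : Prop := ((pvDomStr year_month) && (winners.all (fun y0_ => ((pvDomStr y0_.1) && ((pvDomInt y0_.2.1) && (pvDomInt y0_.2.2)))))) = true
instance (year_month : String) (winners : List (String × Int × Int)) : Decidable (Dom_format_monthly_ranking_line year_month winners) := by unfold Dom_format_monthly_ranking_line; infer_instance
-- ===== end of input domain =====

-- B replaces A's dict-grouping + sort of the distinct keys by one stable descending sort of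
-- the winners list and a single run-cutting pass (alternative decomposition, same asymptotic cost).

-- ===== PORT A =====
-- literal transliteration of A: group into an insertion-ordered dict, then fold over the
-- descending-sorted distinct keys building (parts, values, article_counts).
def format_monthly_ranking_line (year_month : String) (winners : List (String × Int × Int)) : String :=
  if winners.isEmpty then year_month ++ "  [No data]"
  else
    let value_groups : PySem.Dict Int (List (String × Int)) :=
      winners.foldl (fun d w => d.modify w.2.1 [] (· ++ [(w.1, w.2.2)])) PySem.Dict.empty
    let st := (PySem.List.sorted value_groups.keys (fun x => x) true).foldl
      (fun (acc : List String × List String × List String) value =>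
        let journalists := value_groups.getD value []
        let acc' :=
          if journalists.length > 1 then
            (acc.1 ++ ["[" ++ PySem.Str.join ", " (journalists.map (·.1)) ++ "] TIE"],
             acc.2.1,
             acc.2.2 ++ journalists.map (fun j => PySem.Int.toStr j.2))
          else
            (acc.1 ++ [(journalists.headD ("", 0)).1],
             acc.2.1,
             acc.2.2 ++ [PySem.Int.toStr (journalists.headD ("", 0)).2])
        (acc'.1, acc'.2.1 ++ List.replicate journalists.length (PySem.Int.toStr value), acc'.2.2))
      ([], [], [])
    year_month ++ "  " ++ PySem.Str.join ", " st.1 ++ " - " ++ PySem.Str.join ", " st.2.1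
      ++ " - " ++ PySem.Str.join ", " st.2.2

-- ===== PORT B =====
-- transliteration of Source B's while loop: consume the sorted list run by run
-- (the inner counting while-loop is the takeWhile/dropWhile split of the rest).
def pvRunsLoop (acc : List String × List String × List String) :
    List (String × Int × Int) → List String × List String × List String
  | [] => acc
  | w :: rest =>
    let value := w.2.1
    let grp := w :: rest.takeWhile (fun u => u.2.1 == value)
    let rest' := rest.dropWhile (fun u => u.2.1 == value)
    pvRunsLoop
      ((if grp.length > 1 then
          acc.1 ++ ["[" ++ PySem.Str.join ", " (grp.map (·.1)) ++ "] TIE"]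
        else acc.1 ++ [w.1]),
       acc.2.1 ++ List.replicate grp.length (PySem.Int.toStr value),
       acc.2.2 ++ grp.map (fun u => PySem.Int.toStr u.2.2)) rest'
  termination_by l => l.length
  decreasing_by
    simp only [List.length_cons]
    exact Nat.lt_succ_of_le (List.length_dropWhile_le _ _)

def format_monthly_ranking_line_alt (year_month : String) (winners : List (String × Int × Int)) : String :=
  if winners.isEmpty then year_month ++ "  [No data]"
  else
    let ranked := PySem.List.sorted winners (fun w => w.2.1) true
    let st := pvRunsLoop ([], [], []) ranked
    year_month ++ "  " ++ PySem.Str.join ", " st.1 ++ " - " ++ PySem.Str.join ", " st.2.1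
      ++ " - " ++ PySem.Str.join ", " st.2.2

-- ===== PRECONDITION & SPEC =====
def Spec_format_monthly_ranking_line (year_month : String) (winners : List (String × Int × Int)) (out : String) : Prop := out = format_monthly_ranking_line_alt year_month winners
instance (year_month : String) (winners : List (String × Int × Int)) (out : String) : Decidable (Spec_format_monthly_ranking_line year_month winners out) := by unfold Spec_format_monthly_ranking_line; infer_instance

-- ===== CLAIM (what is proved, stated in full; the proofs are below) =====
def Claim_equal_format_monthly_ranking_line : Prop := ∀ (year_month : String) (winners : List (String × Int × Int)), Dom_format_monthly_ranking_line year_month winners → Spec_format_monthly_ranking_line year_month winners (format_monthly_ranking_line year_month winners)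

-- ===== LEMMAS AND PROOFS =====

-- canonical per-value step: both ports' loop bodies, with the group named as a filter of ws
def pvCanonStep (ws : List (String × Int × Int))
    (acc : List String × List String × List String) (v : Int) :
    List String × List String × List String :=
  let g := ws.filter (fun w => w.2.1 == v)
  ((if g.length > 1 then
      acc.1 ++ ["[" ++ PySem.Str.join ", " (g.map (·.1)) ++ "] TIE"]
    else acc.1 ++ [(g.headD ("", 0, 0)).1]),
   acc.2.1 ++ List.replicate g.length (PySem.Int.toStr v),
   acc.2.2 ++ g.map (fun u => PySem.Int.toStr u.2.2))

-- stability of the insertion sort: filtering one key class commutes with sorting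
theorem pv_filter_insertBy_not {α : Type} (b : α → α → Bool) (p : α → Bool) (x : α)
    (h : p x = false) : ∀ ys : List α,
    (PySem.List.insertBy b x ys).filter p = ys.filter p := by
  intro ys
  induction ys with
  | nil => simp [PySem.List.insertBy, List.filter, h]
  | cons y t ih =>
      simp only [PySem.List.insertBy]
      by_cases hb : b x y = true
      · simp [hb, List.filter, h]
      · simp [hb, List.filter_cons, ih]

theorem pv_filter_insertBy_eq {α : Type} (key : α → Int) (v : Int) (x : α)
    (hx : key x = v) : ∀ ys : List α, ys.Pairwise (fun a c => key c ≤ key a) →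
    (PySem.List.insertBy (fun a c => decide (key c < key a)) x ys).filter (fun w => key w == v)
      = ys.filter (fun w => key w == v) ++ [x] := by
  intro ys
  induction ys with
  | nil => simp [PySem.List.insertBy, List.filter, hx]
  | cons y t ih =>
      intro hp
      rcases List.pairwise_cons.mp hp with ⟨hyt, ht⟩
      simp only [PySem.List.insertBy]
      by_cases hb : (decide (key y < key x)) = true
      · have hylt : key y < key x := of_decide_eq_true hb
        have hnil : (y :: t).filter (fun w => key w == v) = [] := by
          rw [List.filter_eq_nil_iff]
          intro a ha
          have : key a ≤ key y := by
            rcases List.mem_cons.mp ha with h | h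
            · simp [h]
            · exact hyt a h
          simp only [beq_iff_eq]
          omega
        simp only [hb, if_true]
        rw [List.filter_cons_of_pos (by simp [hx]), hnil]
        simp
      · simp only [hb, Bool.false_eq_true, if_false, List.filter_cons]
        rw [ih ht]
        by_cases hy : (key y == v) = true
        · simp [hy]
        · simp [hy]

theorem pv_filter_sorted_rev {α : Type} (key : α → Int) (v : Int) (xs : List α) :
    (PySem.List.sorted xs key true).filter (fun w => key w == v)
      = xs.filter (fun w => key w == v) := by
  induction xs using List.reverseRecOn with
  | nil => simp [PySem.List.sorted]
  | append_singleton xs x ih =>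
      rw [PySem.List.sorted_rev_eq_foldl_insertBy, List.foldl_append]
      simp only [List.foldl_cons, List.foldl_nil]
      rw [← PySem.List.sorted_rev_eq_foldl_insertBy]
      by_cases hx : key x = v
      · rw [pv_filter_insertBy_eq key v x hx _ (PySem.List.sorted_pairwise_rev xs key), ih,
          List.filter_append, List.filter_cons_of_pos (by simp [hx])]
        simp
      · rw [pv_filter_insertBy_not _ _ x (by simp [hx]), ih, List.filter_append,
          List.filter_cons_of_neg (by simp [hx])]
        simp

theorem pv_pairwise_gt_of_nodup {l : List Int}
    (hp : l.Pairwise (fun a b => b ≤ a)) (hnd : l.Nodup) :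
    l.Pairwise (fun a b => b < a) := by
  have := hp.and hnd
  exact this.imp (fun {a b} h => lt_of_le_of_ne h.1 (Ne.symm h.2))

theorem pv_sorted_set_pairwise_gt (xs : List Int) :
    (PySem.List.sorted (PySem.Set.ofList xs) (fun x => x) true).Pairwise (fun a b => b < a) := by
  apply pv_pairwise_gt_of_nodup
  · exact PySem.List.sorted_pairwise_rev _ _
  · exact ((PySem.List.sorted_perm _ _ _).nodup_iff).mpr (PySem.Set.nodup_ofList xs)

theorem pv_runs_eq_canon : ∀ (n : Nat) (s : List (String × Int × Int)), s.length ≤ n →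
    s.Pairwise (fun a c => c.2.1 ≤ a.2.1) →
    ∀ acc, pvRunsLoop acc s
      = (PySem.List.sorted (PySem.Set.ofList (s.map (·.2.1))) (fun x => x) true).foldl
          (pvCanonStep s) acc := by
  intro n
  induction n with
  | zero =>
      intro s hs _ acc
      have : s = [] := List.length_eq_zero_iff.mp (Nat.le_zero.mp hs)
      subst this
      simp [pvRunsLoop, PySem.Set.ofList, PySem.List.sorted]
  | succ n ih =>
      intro s hs hp acc
      match s with
      | [] => simp [pvRunsLoop, PySem.Set.ofList, PySem.List.sorted]
      | w :: rest =>
        rcases List.pairwise_cons.mp hp with ⟨hwr, hrp⟩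
        set v0 := w.2.1 with hv0
        set tW := rest.takeWhile (fun u => u.2.1 == v0) with htW
        set dW := rest.dropWhile (fun u => u.2.1 == v0) with hdW
        have hsplit : rest = tW ++ dW := (List.takeWhile_append_dropWhile).symm
        have hgrp : ∀ u ∈ (w :: tW), u.2.1 = v0 := by
          intro u hu
          rcases List.mem_cons.mp hu with h | h
          · rw [h]
          · exact beq_iff_eq.mp (List.mem_takeWhile_imp (p := fun u : String × Int × Int => u.2.1 == v0) h)
        have hdp : dW.Pairwise (fun a c => c.2.1 ≤ a.2.1) :=
          List.Pairwise.sublist (List.dropWhile_sublist _) hrp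
        have hdlt : ∀ u ∈ dW, u.2.1 < v0 := by
          intro u hu
          have hle : u.2.1 ≤ v0 := hwr u (by rw [hsplit]; exact List.mem_append_right _ hu)
          rcases hd : dW with _ | ⟨u0, t⟩
          · rw [hd] at hu; simp at hu
          · have hhead := List.head?_dropWhile_not (fun u => u.2.1 == v0) rest
            rw [← hdW, hd] at hhead
            simp only [List.head?_cons] at hhead
            have hu0 : u0.2.1 ≠ v0 := by simpa using hhead
            have hu0le : u0.2.1 ≤ v0 := hwr u0 (by
              rw [hsplit, hd]; exact List.mem_append_right _ (List.mem_cons_self))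
            have hu0lt : u0.2.1 < v0 := lt_of_le_of_ne hu0le hu0
            rw [hd] at hu
            rcases List.mem_cons.mp hu with h | h
            · rw [h]; exact hu0lt
            · have : u.2.1 ≤ u0.2.1 := by
                rw [hd] at hdp
                exact (List.pairwise_cons.mp hdp).1 u h
              omega
        -- the distinct-values list decomposes as v0 :: (values of dW)
        have hDnd : (PySem.List.sorted (PySem.Set.ofList (dW.map (·.2.1))) (fun x => x) true).Nodup :=
          ((PySem.List.sorted_perm _ _ _).nodup_iff).mpr (PySem.Set.nodup_ofList _)
        have hDmem : ∀ a, a ∈ PySem.List.sorted (PySem.Set.ofList (dW.map (·.2.1))) (fun x => x) true ↔ a ∈ dW.map (·.2.1) := by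
          intro a
          rw [PySem.List.mem_sorted, PySem.Set.mem_ofList]
        have hD : PySem.List.sorted (PySem.Set.ofList ((w :: rest).map (·.2.1))) (fun x => x) true
            = v0 :: PySem.List.sorted (PySem.Set.ofList (dW.map (·.2.1))) (fun x => x) true := by
          apply PySem.List.sorted_rev_eq_of_perm_of_pairwise_gt
          · rw [List.perm_ext_iff_of_nodup]
            · intro a
              simp only [List.mem_cons, hDmem, PySem.Set.mem_ofList]
              constructor
              · rintro (h | h)
                · subst h
                  exact List.mem_map.mpr ⟨w, List.mem_cons_self, rfl⟩
                · rcases List.mem_map.mp h with ⟨u, hu, rfl⟩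
                  refine List.mem_map.mpr ⟨u, ?_, rfl⟩
                  exact List.mem_cons_of_mem _ (by rw [hsplit]; exact List.mem_append_right _ hu)
              · intro h
                rcases List.mem_map.mp h with ⟨u, hu, rfl⟩
                rcases List.mem_cons.mp hu with h1 | h1
                · left; rw [h1]
                · rw [hsplit] at h1
                  rcases List.mem_append.mp h1 with h2 | h2
                  · left
                    exact beq_iff_eq.mp (List.mem_takeWhile_imp (p := fun u : String × Int × Int => u.2.1 == v0) h2)
                  · right; exact List.mem_map.mpr ⟨u, h2, rfl⟩
            · refine List.nodup_cons.mpr ⟨?_, hDnd⟩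
              intro hmem
              rcases List.mem_map.mp ((hDmem v0).mp hmem) with ⟨u, hu, hku⟩
              exact absurd (hku ▸ hdlt u hu) (lt_irrefl v0)
            · exact PySem.Set.nodup_ofList _
          · refine List.pairwise_cons.mpr ⟨?_, pv_sorted_set_pairwise_gt _⟩
            intro b hb
            rcases List.mem_map.mp ((hDmem b).mp hb) with ⟨u, hu, rfl⟩
            exact hdlt u hu
        -- the first group is exactly the filter at v0
        have htWf : tW.filter (fun u => u.2.1 == v0) = tW :=
          List.filter_eq_self.mpr (fun u hu => List.mem_takeWhile_imp (p := fun u : String × Int × Int => u.2.1 == v0) hu)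
        have hdWf0 : dW.filter (fun u => u.2.1 == v0) = [] := by
          rw [List.filter_eq_nil_iff]
          intro u hu
          have := hdlt u hu
          simp only [beq_iff_eq]
          omega
        have hfilter0 : (w :: rest).filter (fun u => u.2.1 == v0) = w :: tW := by
          rw [List.filter_cons_of_pos (by simp [hv0]), hsplit, List.filter_append, htWf, hdWf0]
          simp
        have hfiltv : ∀ v : Int, v ∈ dW.map (·.2.1) →
            (w :: rest).filter (fun u => u.2.1 == v) = dW.filter (fun u => u.2.1 == v) := by
          intro v hv
          rcases List.mem_map.mp hv with ⟨u, hu, rfl⟩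
          have hlt := hdlt u hu
          have htWv : tW.filter (fun x => x.2.1 == u.2.1) = [] := by
            rw [List.filter_eq_nil_iff]
            intro a ha
            have := List.mem_takeWhile_imp (p := fun u : String × Int × Int => u.2.1 == v0) ha
            simp only [beq_iff_eq] at this ⊢
            omega
          rw [List.filter_cons_of_neg (by simp only [beq_iff_eq]; omega), hsplit,
            List.filter_append, htWv, List.nil_append]
        have hlen : dW.length ≤ n := by
          have hd := List.length_dropWhile_le (fun u : String × Int × Int => u.2.1 == v0) rest
          simp only [List.length_cons] at hs
          rw [hdW]
          omega
        have hstep : pvCanonStep (w :: rest) acc v0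
            = ((if (w :: tW).length > 1 then
                  acc.1 ++ ["[" ++ PySem.Str.join ", " ((w :: tW).map (·.1)) ++ "] TIE"]
                else acc.1 ++ [w.1]),
               acc.2.1 ++ List.replicate (w :: tW).length (PySem.Int.toStr v0),
               acc.2.2 ++ (w :: tW).map (fun u => PySem.Int.toStr u.2.2)) := by
          simp only [pvCanonStep, hfilter0, List.headD_cons]
        have hcong : ∀ accX : List String × List String × List String,
            List.foldl (pvCanonStep (w :: rest)) accX
              (PySem.List.sorted (PySem.Set.ofList (dW.map (·.2.1))) (fun x => x) true)
            = List.foldl (pvCanonStep dW) accX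
              (PySem.List.sorted (PySem.Set.ofList (dW.map (·.2.1))) (fun x => x) true) := by
          intro accX
          apply PySem.List.foldl_congr_mem
          intro acc2 v hv
          unfold pvCanonStep
          rw [hfiltv v ((hDmem v).mp hv)]
        rw [hD, List.foldl_cons, hcong, hstep]
        rw [pvRunsLoop]
        rw [ih dW hlen hdp]



theorem pv_stab (winners : List (String × Int × Int)) (v : Int) :
    (PySem.List.sorted winners (fun w => w.2.1) true).filter (fun w => w.2.1 == v)
      = winners.filter (fun w => w.2.1 == v) :=
  pv_filter_sorted_rev (fun w => w.2.1) v winners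

theorem pv_keys_eq (winners : List (String × Int × Int)) :
    (winners.foldl (fun d w => d.modify w.2.1 [] (· ++ [(w.1, w.2.2)]))
        (PySem.Dict.empty : PySem.Dict Int (List (String × Int)))).keys
      = PySem.Set.ofList (winners.map (·.2.1)) := by
  rw [PySem.Dict.keys_foldl_modify_key winners (fun w => w.2.1) []
    (fun _ w => fun cur => cur ++ [(w.1, w.2.2)]) PySem.Dict.empty]
  simp [PySem.Set.update, PySem.Dict.keys_empty, ← PySem.Set.ofList_eq_foldl]

theorem pv_getD_eq (winners : List (String × Int × Int)) (v : Int) :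
    (winners.foldl (fun d w => d.modify w.2.1 [] (· ++ [(w.1, w.2.2)]))
        (PySem.Dict.empty : PySem.Dict Int (List (String × Int)))).getD v []
      = (winners.filter (fun w => w.2.1 == v)).map (fun w => (w.1, w.2.2)) := by
  rw [show winners.foldl (fun d w => d.modify w.2.1 [] (· ++ [(w.1, w.2.2)]))
        (PySem.Dict.empty : PySem.Dict Int (List (String × Int)))
      = (winners.map (fun w => (w.2.1, (w.1, w.2.2)))).foldl
          (fun d p => d.modify p.1 [] (· ++ [p.2])) PySem.Dict.empty from
    (List.foldl_map).symm ▸ rfl]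
  rw [PySem.Dict.getD_foldl_modify_append]
  simp [List.filter_map, List.map_map, Function.comp_def]

theorem pv_A_fold_eq (winners : List (String × Int × Int)) :
    (PySem.List.sorted
        (winners.foldl (fun d w => d.modify w.2.1 [] (· ++ [(w.1, w.2.2)]))
          (PySem.Dict.empty : PySem.Dict Int (List (String × Int)))).keys (fun x => x) true).foldl
      (fun (acc : List String × List String × List String) value =>
        let journalists := (winners.foldl (fun d w => d.modify w.2.1 [] (· ++ [(w.1, w.2.2)]))
          (PySem.Dict.empty : PySem.Dict Int (List (String × Int)))).getD value []
        let acc' :=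
          if journalists.length > 1 then
            (acc.1 ++ ["[" ++ PySem.Str.join ", " (journalists.map (·.1)) ++ "] TIE"],
             acc.2.1,
             acc.2.2 ++ journalists.map (fun j => PySem.Int.toStr j.2))
          else
            (acc.1 ++ [(journalists.headD ("", 0)).1],
             acc.2.1,
             acc.2.2 ++ [PySem.Int.toStr (journalists.headD ("", 0)).2])
        (acc'.1, acc'.2.1 ++ List.replicate journalists.length (PySem.Int.toStr value), acc'.2.2))
      ([], [], [])
    = (PySem.List.sorted (PySem.Set.ofList (winners.map (·.2.1))) (fun x => x) true).foldl
        (pvCanonStep winners) ([], [], []) := by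
  rw [pv_keys_eq]
  apply PySem.List.foldl_congr_mem
  intro acc v hv
  have hvmem : v ∈ winners.map (·.2.1) := by
    have := (PySem.List.mem_sorted _ _ _ v).mp hv
    rwa [PySem.Set.mem_ofList] at this
  rcases List.mem_map.mp hvmem with ⟨u, hu, rfl⟩
  have hne : u ∈ winners.filter (fun w => w.2.1 == u.2.1) :=
    List.mem_filter.mpr ⟨hu, by simp⟩
  rw [pv_getD_eq]
  unfold pvCanonStep
  simp only [List.length_map]
  by_cases hg : (winners.filter (fun w => w.2.1 == u.2.1)).length > 1
  · simp only [hg, if_true, List.map_map]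
    rfl
  · have hlen1 : (winners.filter (fun w => w.2.1 == u.2.1)).length = 1 := by
      have : 0 < (winners.filter (fun w => w.2.1 == u.2.1)).length :=
        List.length_pos_of_mem hne
      omega
    rcases List.length_eq_one_iff.mp hlen1 with ⟨a, ha⟩
    simp [ha]



theorem pv_main (ym : String) (winners : List (String × Int × Int)) :
    format_monthly_ranking_line ym winners = format_monthly_ranking_line_alt ym winners := by
  by_cases hw : winners.isEmpty
  · simp [format_monthly_ranking_line, format_monthly_ranking_line_alt, hw]
  · have hB := pv_runs_eq_canon (PySem.List.sorted winners (fun w => w.2.1) true).length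
      (PySem.List.sorted winners (fun w => w.2.1) true) le_rfl
      (PySem.List.sorted_pairwise_rev winners (fun w => w.2.1)) ([], [], [])
    have hDeq : PySem.List.sorted
        (PySem.Set.ofList ((PySem.List.sorted winners (fun w => w.2.1) true).map (·.2.1)))
        (fun x => x) true
        = PySem.List.sorted (PySem.Set.ofList (winners.map (·.2.1))) (fun x => x) true := by
      apply PySem.List.sorted_rev_eq_of_perm_of_pairwise_gt
      · rw [List.perm_ext_iff_of_nodup
          (((PySem.List.sorted_perm _ _ _).nodup_iff).mpr (PySem.Set.nodup_ofList _))
          (PySem.Set.nodup_ofList _)]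
        intro a
        rw [PySem.List.mem_sorted _ _ _ a, PySem.Set.mem_ofList, PySem.Set.mem_ofList]
        exact ((PySem.List.sorted_perm winners (fun w => w.2.1) true).map (·.2.1)).mem_iff.symm
      · exact pv_sorted_set_pairwise_gt _
    have hcanon : List.foldl (pvCanonStep (PySem.List.sorted winners (fun w => w.2.1) true))
        ([], [], []) (PySem.List.sorted (PySem.Set.ofList (winners.map (·.2.1))) (fun x => x) true)
        = List.foldl (pvCanonStep winners) ([], [], [])
            (PySem.List.sorted (PySem.Set.ofList (winners.map (·.2.1))) (fun x => x) true) := by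
      apply PySem.List.foldl_congr_mem
      intro acc2 v hv
      unfold pvCanonStep
      rw [pv_stab]
    have hst : pvRunsLoop ([], [], []) (PySem.List.sorted winners (fun w => w.2.1) true)
        = List.foldl (pvCanonStep winners) ([], [], [])
            (PySem.List.sorted (PySem.Set.ofList (winners.map (·.2.1))) (fun x => x) true) := by
      rw [hB, hDeq, hcanon]
    simp only [format_monthly_ranking_line, format_monthly_ranking_line_alt, hw,
      Bool.false_eq_true, if_false]
    rw [pv_A_fold_eq, hst]

-- ===== VERDICT (by name: the statement is the Claim_ definition above) =====
theorem format_monthly_ranking_line_spec : Claim_equal_format_monthly_ranking_line := by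
  intro year_month winners _
  unfold Spec_format_monthly_ranking_line
  exact pv_main year_month winners
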